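-- pv_equiv track=rewrite | github.com/domeniczz/.dotfiles | .config/opencode/skills/skill-manager/scripts/update_skills.py | strip_jsonc_comments
-- ===== SOURCE A (Python) =====
-- def strip_jsonc_comments(text: str) -> str:
--     """Remove // and /* */ comments from JSONC (not inside strings)."""
--     result = []
--     i = 0
--     in_string = False
--     while i < len(text):
--         ch = text[i]
--         # Handle string boundaries (with proper escaped-quote handling)
--         if ch == '"' and not in_string:
--             in_string = True
--             result.append(ch)
--             i += 1
--         elif ch == '"' and in_string:
--             # Count preceding backslashes to handle \\\" correctly
--             num_backslashes = 0
--             j = i - 1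
--             while j >= 0 and text[j] == '\\':
--                 num_backslashes += 1
--                 j -= 1
--             if num_backslashes % 2 == 0:
--                 in_string = False
--             result.append(ch)
--             i += 1
--         elif not in_string and ch == '/' and i + 1 < len(text) and text[i + 1] == '/':
--             # Line comment: skip to end of line
--             while i < len(text) and text[i] != '\n':
--                 i += 1
--         elif not in_string and ch == '/' and i + 1 < len(text) and text[i + 1] == '*':
--             # Block comment: skip to closing */
--             i += 2
--             while i + 1 < len(text) and not (text[i] == '*' and text[i + 1] == '/'):
--                 i += 1
--             i += 2  # skip past */
--         else:
--             result.append(ch)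
--             i += 1
--     return ''.join(result)
-- ===== SOURCE B (Python) =====
-- def strip_jsonc_comments(text: str) -> str:
--     """Single-pass DFA: states normal/slash/line/block/block-star/string with an
--     incrementally-maintained escape flag (no backslash rescanning)."""
--     NORMAL, SLASH, LINE, BLOCK, BLOCK_STAR, STRING = range(6)
--     out = []
--     state = NORMAL
--     esc = False
--     for ch in text:
--         if state == NORMAL:
--             if ch == '"':
--                 out.append(ch)
--                 state = STRING
--                 esc = False
--             elif ch == '/':
--                 state = SLASH
--             else:
--                 out.append(ch)
--         elif state == SLASH:
--             if ch == '/':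
--                 state = LINE
--             elif ch == '*':
--                 state = BLOCK
--             elif ch == '"':
--                 out.append('/')
--                 out.append(ch)
--                 state = STRING
--                 esc = False
--             else:
--                 out.append('/')
--                 out.append(ch)
--                 state = NORMAL
--         elif state == LINE:
--             if ch == '\n':
--                 out.append(ch)
--                 state = NORMAL
--         elif state == BLOCK:
--             if ch == '*':
--                 state = BLOCK_STAR
--         elif state == BLOCK_STAR:
--             if ch == '/':
--                 state = NORMAL
--             elif ch != '*':
--                 state = BLOCK
--         else:  # STRING
--             out.append(ch)
--             if ch == '\\':
--                 esc = not esc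
--             elif ch == '"':
--                 if not esc:
--                     state = NORMAL
--                 esc = False
--             else:
--                 esc = False
--     if state == SLASH:
--         out.append('/')
--     return ''.join(out)
-- ===== Notes on version B (the rewrite author's own statement) =====
-- stated objective: faster
-- what changed: Replaced A's index-juggling loop with nested skip-loops and a backlash-rescan at every quote by a single-pass six-state DFA (normal/slash/line/block/block-star/string) that maintains the escape flag incrementally.
import Mathlib
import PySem

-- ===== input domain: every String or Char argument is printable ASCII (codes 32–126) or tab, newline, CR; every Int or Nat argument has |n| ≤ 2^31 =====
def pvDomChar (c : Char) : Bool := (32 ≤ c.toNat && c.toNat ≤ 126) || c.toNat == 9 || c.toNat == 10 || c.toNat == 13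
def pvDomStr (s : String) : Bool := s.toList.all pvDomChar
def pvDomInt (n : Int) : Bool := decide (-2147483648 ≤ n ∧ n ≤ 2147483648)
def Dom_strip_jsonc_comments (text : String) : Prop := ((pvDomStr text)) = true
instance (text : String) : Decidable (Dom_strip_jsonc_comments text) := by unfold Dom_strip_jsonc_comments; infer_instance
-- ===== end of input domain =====

-- B replaces A's index-juggling loop (which rescans preceding backslashes at every
-- quote) by a single-pass six-state DFA with an incrementally maintained escape flag.

-- ===== PORT A =====
-- count of backslashes immediately preceding position i (A's inner `while j >= 0` loop)
def bsCount (cs : List Char) : Nat → Nat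
  | 0 => 0
  | j + 1 => if cs.getD j ' ' = '\\' then bsCount cs j + 1 else 0

-- A's `while i < len(text) and text[i] != '\n'` skip loop (fuel-bounded recursion;
-- fuel cs.length + 1 always suffices since j strictly increases and stops at cs.length)
def skipLineF (cs : List Char) : Nat → Nat → Nat
  | 0, j => j
  | f + 1, j => if j < cs.length ∧ cs.getD j ' ' ≠ '\n' then skipLineF cs f (j + 1) else j

def skipLine (cs : List Char) (j : Nat) : Nat := skipLineF cs (cs.length + 1) j

-- A's `while i + 1 < len(text) and not (text[i]=='*' and text[i+1]=='/')` skip loop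
def skipBlockF (cs : List Char) : Nat → Nat → Nat
  | 0, j => j
  | f + 1, j =>
    if j + 1 < cs.length ∧ ¬(cs.getD j ' ' = '*' ∧ cs.getD (j + 1) ' ' = '/') then
      skipBlockF cs f (j + 1)
    else j

def skipBlock (cs : List Char) (j : Nat) : Nat := skipBlockF cs (cs.length + 1) j

-- A's outer `while i < len(text)` loop; fuel = number of remaining iterations + slack
def goA (cs : List Char) : Nat → Nat → Bool → List Char → List Char
  | 0, _, _, acc => acc
  | f + 1, i, inStr, acc =>
    if i < cs.length then
      let ch := cs.getD i ' '
      if ch = '"' ∧ inStr = false then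
        goA cs f (i + 1) true (acc ++ [ch])
      else if ch = '"' ∧ inStr = true then
        if bsCount cs i % 2 = 0 then goA cs f (i + 1) false (acc ++ [ch])
        else goA cs f (i + 1) true (acc ++ [ch])
      else if inStr = false ∧ ch = '/' ∧ i + 1 < cs.length ∧ cs.getD (i + 1) ' ' = '/' then
        goA cs f (skipLine cs i) false acc
      else if inStr = false ∧ ch = '/' ∧ i + 1 < cs.length ∧ cs.getD (i + 1) ' ' = '*' then
        goA cs f (skipBlock cs (i + 2) + 2) false acc
      else
        goA cs f (i + 1) inStr (acc ++ [ch])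
    else acc

def strip_jsonc_comments (text : String) : String :=
  String.ofList (goA text.toList (text.toList.length + 1) 0 false [])

-- ===== PORT B =====
inductive BSt
  | normal | slash | line | block | blockStar
  | instr : Bool → BSt
deriving DecidableEq, Repr

def goB : BSt → List Char → List Char → List Char
  | st, [], acc => if st = .slash then acc ++ ['/'] else acc
  | st, c :: rest, acc =>
    match st with
    | .normal =>
      if c = '"' then goB (.instr false) rest (acc ++ [c])
      else if c = '/' then goB .slash rest acc
      else goB .normal rest (acc ++ [c])
    | .slash =>
      if c = '/' then goB .line rest acc
      else if c = '*' then goB .block rest acc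
      else if c = '"' then goB (.instr false) rest (acc ++ ['/', c])
      else goB .normal rest (acc ++ ['/', c])
    | .line => if c = '\n' then goB .normal rest (acc ++ [c]) else goB .line rest acc
    | .block => if c = '*' then goB .blockStar rest acc else goB .block rest acc
    | .blockStar =>
      if c = '/' then goB .normal rest acc
      else if c = '*' then goB .blockStar rest acc
      else goB .block rest acc
    | .instr esc =>
      if c = '\\' then goB (.instr (!esc)) rest (acc ++ [c])
      else if c = '"' then
        if esc then goB (.instr false) rest (acc ++ [c])
        else goB .normal rest (acc ++ [c])
      else goB (.instr false) rest (acc ++ [c])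

def strip_jsonc_comments_alt (text : String) : String :=
  String.ofList (goB .normal text.toList [])

-- ===== PRECONDITION & SPEC =====
def Spec_strip_jsonc_comments (text : String) (out : String) : Prop := out = strip_jsonc_comments_alt text
instance (text : String) (out : String) : Decidable (Spec_strip_jsonc_comments text out) := by unfold Spec_strip_jsonc_comments; infer_instance

-- ===== CLAIM (what is proved, stated in full; the proofs are below) =====
def Claim_equal_strip_jsonc_comments : Prop := ∀ (text : String), Dom_strip_jsonc_comments text → Spec_strip_jsonc_comments text (strip_jsonc_comments text)

-- ===== LEMMAS AND PROOFS =====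

lemma drop_getD (cs : List Char) (i : Nat) (h : i < cs.length) :
    cs.drop i = cs.getD i ' ' :: cs.drop (i + 1) := by
  rw [List.getD_eq_getElem _ _ h]
  exact List.drop_eq_getElem_cons h

lemma skipLineF_irrel (cs : List Char) :
    ∀ (f f' j : Nat), cs.length - j ≤ f → cs.length - j ≤ f' →
      skipLineF cs f j = skipLineF cs f' j := by
  intro f
  induction f with
  | zero =>
    intro f' j hf hf'
    cases f' with
    | zero => rfl
    | succ f' =>
      rw [skipLineF, skipLineF, if_neg (fun h => absurd h.1 (by omega))]
  | succ f ihf =>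
    intro f' j hf hf'
    cases f' with
    | zero =>
      rw [skipLineF, skipLineF, if_neg (fun h => absurd h.1 (by omega))]
    | succ f' =>
      rw [skipLineF, skipLineF]
      by_cases h : j < cs.length ∧ cs.getD j ' ' ≠ '\n'
      · rw [if_pos h, if_pos h]
        exact ihf f' (j + 1) (by omega) (by omega)
      · rw [if_neg h, if_neg h]

lemma skipBlockF_irrel (cs : List Char) :
    ∀ (f f' j : Nat), cs.length - j ≤ f → cs.length - j ≤ f' →
      skipBlockF cs f j = skipBlockF cs f' j := by
  intro f
  induction f with
  | zero =>
    intro f' j hf hf'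
    cases f' with
    | zero => rfl
    | succ f' =>
      rw [skipBlockF, skipBlockF, if_neg (fun h => absurd h.1 (by omega))]
  | succ f ihf =>
    intro f' j hf hf'
    cases f' with
    | zero =>
      rw [skipBlockF, skipBlockF, if_neg (fun h => absurd h.1 (by omega))]
    | succ f' =>
      rw [skipBlockF, skipBlockF]
      by_cases h : j + 1 < cs.length ∧ ¬(cs.getD j ' ' = '*' ∧ cs.getD (j + 1) ' ' = '/')
      · rw [if_pos h, if_pos h]
        exact ihf f' (j + 1) (by omega) (by omega)
      · rw [if_neg h, if_neg h]

lemma skipLine_step (cs : List Char) (j : Nat) (h : j < cs.length ∧ cs.getD j ' ' ≠ '\n') :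
    skipLine cs j = skipLine cs (j + 1) := by
  rw [skipLine, skipLineF, if_pos h, skipLine]
  exact skipLineF_irrel cs cs.length (cs.length + 1) (j + 1) (by omega) (by omega)

lemma skipLine_stop (cs : List Char) (j : Nat) (h : ¬(j < cs.length ∧ cs.getD j ' ' ≠ '\n')) :
    skipLine cs j = j := by rw [skipLine, skipLineF, if_neg h]

lemma skipBlock_step (cs : List Char) (j : Nat)
    (h : j + 1 < cs.length ∧ ¬(cs.getD j ' ' = '*' ∧ cs.getD (j + 1) ' ' = '/')) :
    skipBlock cs j = skipBlock cs (j + 1) := by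
  rw [skipBlock, skipBlockF, if_pos h, skipBlock]
  exact skipBlockF_irrel cs cs.length (cs.length + 1) (j + 1) (by omega) (by omega)

lemma skipBlock_stop (cs : List Char) (j : Nat)
    (h : ¬(j + 1 < cs.length ∧ ¬(cs.getD j ' ' = '*' ∧ cs.getD (j + 1) ' ' = '/'))) :
    skipBlock cs j = j := by rw [skipBlock, skipBlockF, if_neg h]

lemma bsCount_succ (cs : List Char) (i : Nat) :
    bsCount cs (i + 1) = if cs.getD i ' ' = '\\' then bsCount cs i + 1 else 0 := rfl

lemma goA_succ (cs : List Char) (f i : Nat) (b : Bool) (acc : List Char) :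
    goA cs (f + 1) i b acc = if i < cs.length then
      (if cs.getD i ' ' = '"' ∧ b = false then
        goA cs f (i + 1) true (acc ++ [cs.getD i ' '])
      else if cs.getD i ' ' = '"' ∧ b = true then
        (if bsCount cs i % 2 = 0 then goA cs f (i + 1) false (acc ++ [cs.getD i ' '])
        else goA cs f (i + 1) true (acc ++ [cs.getD i ' ']))
      else if b = false ∧ cs.getD i ' ' = '/' ∧ i + 1 < cs.length ∧ cs.getD (i + 1) ' ' = '/' then
        goA cs f (skipLine cs i) false acc
      else if b = false ∧ cs.getD i ' ' = '/' ∧ i + 1 < cs.length ∧ cs.getD (i + 1) ' ' = '*' then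
        goA cs f (skipBlock cs (i + 2) + 2) false acc
      else
        goA cs f (i + 1) b (acc ++ [cs.getD i ' '])) else acc := rfl

lemma goB_nil (st : BSt) (acc : List Char) :
    goB st [] acc = if st = .slash then acc ++ ['/'] else acc := rfl

lemma goB_normal (c : Char) (rest acc : List Char) :
    goB .normal (c :: rest) acc = if c = '"' then goB (.instr false) rest (acc ++ [c])
      else if c = '/' then goB .slash rest acc
      else goB .normal rest (acc ++ [c]) := rfl

lemma goB_slash (c : Char) (rest acc : List Char) :
    goB .slash (c :: rest) acc = if c = '/' then goB .line rest acc
      else if c = '*' then goB .block rest acc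
      else if c = '"' then goB (.instr false) rest (acc ++ ['/', c])
      else goB .normal rest (acc ++ ['/', c]) := rfl

lemma goB_line (c : Char) (rest acc : List Char) :
    goB .line (c :: rest) acc =
      if c = '\n' then goB .normal rest (acc ++ [c]) else goB .line rest acc := rfl

lemma goB_block (c : Char) (rest acc : List Char) :
    goB .block (c :: rest) acc =
      if c = '*' then goB .blockStar rest acc else goB .block rest acc := rfl

lemma goB_blockStar (c : Char) (rest acc : List Char) :
    goB .blockStar (c :: rest) acc = if c = '/' then goB .normal rest acc
      else if c = '*' then goB .blockStar rest acc
      else goB .block rest acc := rfl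

lemma goB_instr (esc : Bool) (c : Char) (rest acc : List Char) :
    goB (.instr esc) (c :: rest) acc =
      if c = '\\' then goB (.instr (!esc)) rest (acc ++ [c])
      else if c = '"' then
        (if esc then goB (.instr false) rest (acc ++ [c]) else goB .normal rest (acc ++ [c]))
      else goB (.instr false) rest (acc ++ [c]) := rfl

lemma key_base (cs : List Char) (i : Nat) (hle : cs.length ≤ i) (f : Nat) (hf : 0 < f)
    (acc : List Char) :
    (goA cs f i false acc = goB .normal (cs.drop i) acc) ∧
    (goA cs f i true acc = goB (.instr (decide (bsCount cs i % 2 = 1))) (cs.drop i) acc) ∧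
    (goA cs f (skipLine cs i) false acc = goB .line (cs.drop i) acc) ∧
    (goA cs f (skipBlock cs i + 2) false acc = goB .block (cs.drop i) acc) ∧
    (i < cs.length → cs.getD i ' ' = '*' →
      goA cs f (skipBlock cs i + 2) false acc = goB .blockStar (cs.drop (i + 1)) acc) := by
  obtain ⟨f, rfl⟩ : ∃ f', f = f' + 1 := ⟨f - 1, by omega⟩
  have hd : cs.drop i = [] := List.drop_eq_nil_of_le hle
  have hni : ¬ i < cs.length := by omega
  have hsl : skipLine cs i = i := skipLine_stop cs i (fun h => hni h.1)
  have hsb : skipBlock cs i = i := skipBlock_stop cs i (fun h => absurd h.1 (by omega))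
  refine ⟨?_, ?_, ?_, ?_, fun h => absurd h hni⟩
  · rw [hd, goA_succ, if_neg hni, goB_nil, if_neg (by decide)]
  · rw [hd, goA_succ, if_neg hni, goB_nil, if_neg (fun h => BSt.noConfusion h)]
  · rw [hsl, hd, goA_succ, if_neg hni, goB_nil, if_neg (by decide)]
  · rw [hsb, hd, goA_succ, if_neg (show ¬ i + 2 < cs.length by omega), goB_nil,
      if_neg (by decide)]

theorem key (cs : List Char) : ∀ (k i : Nat), cs.length - i ≤ k →
    ∀ (f : Nat), cs.length - i < f → ∀ (acc : List Char),
    (goA cs f i false acc = goB .normal (cs.drop i) acc) ∧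
    (goA cs f i true acc = goB (.instr (decide (bsCount cs i % 2 = 1))) (cs.drop i) acc) ∧
    (goA cs f (skipLine cs i) false acc = goB .line (cs.drop i) acc) ∧
    (goA cs f (skipBlock cs i + 2) false acc = goB .block (cs.drop i) acc) ∧
    (i < cs.length → cs.getD i ' ' = '*' →
      goA cs f (skipBlock cs i + 2) false acc = goB .blockStar (cs.drop (i + 1)) acc) := by
  intro k
  induction k with
  | zero =>
    intro i hi f hf acc
    exact key_base cs i (by omega) f (by omega) acc
  | succ k ih =>
    intro i hi f hf acc
    by_cases hin : i < cs.length
    · obtain ⟨f, rfl⟩ : ∃ f', f = f' + 1 := ⟨f - 1, by omega⟩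
      have hdrop : cs.drop i = cs.getD i ' ' :: cs.drop (i + 1) := drop_getD cs i hin
      -- clause (e): blockStar
      have he : i < cs.length → cs.getD i ' ' = '*' →
          goA cs (f + 1) (skipBlock cs i + 2) false acc = goB .blockStar (cs.drop (i + 1)) acc := by
        intro _ hc
        by_cases h1 : i + 1 < cs.length
        · have hdrop1 : cs.drop (i + 1) = cs.getD (i + 1) ' ' :: cs.drop (i + 2) :=
            drop_getD cs (i + 1) h1
          by_cases hc1 : cs.getD (i + 1) ' ' = '/'
          · rw [skipBlock_stop cs i (fun h => h.2 ⟨hc, hc1⟩), hdrop1, goB_blockStar, if_pos hc1]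
            exact (ih (i + 2) (by omega) (f + 1) (by omega) acc).1
          · by_cases hc1s : cs.getD (i + 1) ' ' = '*'
            · rw [skipBlock_step cs i ⟨h1, fun h => hc1 h.2⟩, hdrop1, goB_blockStar,
                if_neg hc1, if_pos hc1s]
              exact (ih (i + 1) (by omega) (f + 1) (by omega) acc).2.2.2.2 h1 hc1s
            · rw [skipBlock_step cs i ⟨h1, fun h => hc1 h.2⟩, hdrop1, goB_blockStar,
                if_neg hc1, if_neg hc1s]
              by_cases h2 : i + 2 < cs.length
              · rw [skipBlock_step cs (i + 1) ⟨h2, fun h => hc1s h.1⟩]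
                exact (ih (i + 2) (by omega) (f + 1) (by omega) acc).2.2.2.1
              · rw [skipBlock_stop cs (i + 1) (fun h => h2 h.1),
                  List.drop_eq_nil_of_le (show cs.length ≤ i + 2 by omega),
                  goB_nil, if_neg (by decide), goA_succ,
                  if_neg (show ¬ i + 1 + 2 < cs.length by omega)]
        · rw [skipBlock_stop cs i (fun h => h1 h.1),
            List.drop_eq_nil_of_le (show cs.length ≤ i + 1 by omega),
            goB_nil, if_neg (by decide), goA_succ,
            if_neg (show ¬ i + 2 < cs.length by omega)]
      -- clause (c): line comments
      have hcL : goA cs (f + 1) (skipLine cs i) false acc = goB .line (cs.drop i) acc := by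
        by_cases hnl : cs.getD i ' ' = '\n'
        · rw [skipLine_stop cs i (fun h => h.2 hnl), hdrop, goB_line, if_pos hnl,
            goA_succ, if_pos hin,
            if_neg (fun h => absurd (hnl ▸ h.1) (by decide)),
            if_neg (fun h => absurd h.2 (by decide)),
            if_neg (fun h => absurd (hnl ▸ h.2.1) (by decide)),
            if_neg (fun h => absurd (hnl ▸ h.2.1) (by decide))]
          exact (ih (i + 1) (by omega) f (by omega) (acc ++ [cs.getD i ' '])).1
        · rw [skipLine_step cs i ⟨hin, hnl⟩, hdrop, goB_line, if_neg hnl]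
          exact (ih (i + 1) (by omega) (f + 1) (by omega) acc).2.2.1
      -- clause (d): block comments
      have hdB : goA cs (f + 1) (skipBlock cs i + 2) false acc = goB .block (cs.drop i) acc := by
        by_cases hc : cs.getD i ' ' = '*'
        · rw [hdrop, goB_block, if_pos hc]
          exact he hin hc
        · by_cases h1 : i + 1 < cs.length
          · rw [skipBlock_step cs i ⟨h1, fun h => hc h.1⟩, hdrop, goB_block, if_neg hc]
            exact (ih (i + 1) (by omega) (f + 1) (by omega) acc).2.2.2.1
          · rw [skipBlock_stop cs i (fun h => h1 h.1), hdrop, goB_block, if_neg hc,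
              List.drop_eq_nil_of_le (show cs.length ≤ i + 1 by omega),
              goB_nil, if_neg (by decide), goA_succ,
              if_neg (show ¬ i + 2 < cs.length by omega)]
      -- clause (b): inside a string
      have hbS : goA cs (f + 1) i true acc =
          goB (.instr (decide (bsCount cs i % 2 = 1))) (cs.drop i) acc := by
        rw [hdrop, goA_succ, if_pos hin, goB_instr,
          if_neg (fun h : _ ∧ (true : Bool) = false => absurd h.2 (by decide))]
        by_cases hq : cs.getD i ' ' = '"'
        · have hnb : ¬ cs.getD i ' ' = '\\' := by rw [hq]; decide
          rw [if_pos ⟨hq, rfl⟩, if_neg hnb, if_pos hq]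
          have hz : bsCount cs (i + 1) = 0 := by rw [bsCount_succ, if_neg hnb]
          by_cases hp : bsCount cs i % 2 = 0
          · have e0 : decide (bsCount cs i % 2 = 1) = false := by
              simp only [decide_eq_false_iff_not]; omega
            rw [if_pos hp, e0, if_neg (show ¬ (false : Bool) = true by decide)]
            exact (ih (i + 1) (by omega) f (by omega) (acc ++ [cs.getD i ' '])).1
          · have e1 : decide (bsCount cs i % 2 = 1) = true := by
              simp only [decide_eq_true_iff]; omega
            rw [if_neg hp, e1, if_pos (show (true : Bool) = true from rfl)]
            have := (ih (i + 1) (by omega) f (by omega) (acc ++ [cs.getD i ' '])).2.1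
            rw [hz] at this
            exact this
        · by_cases hb : cs.getD i ' ' = '\\'
          · rw [if_neg (fun h => hq h.1),
              if_neg (fun h : (true : Bool) = false ∧ _ => absurd h.1 (by decide)),
              if_neg (fun h : (true : Bool) = false ∧ _ => absurd h.1 (by decide)),
              if_pos hb]
            have := (ih (i + 1) (by omega) f (by omega) (acc ++ [cs.getD i ' '])).2.1
            have hflip : bsCount cs (i + 1) = bsCount cs i + 1 := by
              rw [bsCount_succ, if_pos hb]
            rw [hflip] at this
            have hbool : decide ((bsCount cs i + 1) % 2 = 1) =
                !decide (bsCount cs i % 2 = 1) := by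
              by_cases hp : bsCount cs i % 2 = 1 <;> simp [hp] <;> omega
            rw [hbool] at this
            exact this
          · rw [if_neg (fun h => hq h.1),
              if_neg (fun h : (true : Bool) = false ∧ _ => absurd h.1 (by decide)),
              if_neg (fun h : (true : Bool) = false ∧ _ => absurd h.1 (by decide)),
              if_neg hb, if_neg hq]
            have := (ih (i + 1) (by omega) f (by omega) (acc ++ [cs.getD i ' '])).2.1
            have hz : bsCount cs (i + 1) = 0 := by rw [bsCount_succ, if_neg hb]
            rw [hz] at this
            exact this
      -- clause (a): normal state
      have haN : goA cs (f + 1) i false acc = goB .normal (cs.drop i) acc := by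
        rw [hdrop, goA_succ, if_pos hin, goB_normal]
        by_cases hq : cs.getD i ' ' = '"'
        · rw [if_pos ⟨hq, rfl⟩, if_pos hq]
          have hnb : ¬ cs.getD i ' ' = '\\' := by rw [hq]; decide
          have := (ih (i + 1) (by omega) f (by omega) (acc ++ [cs.getD i ' '])).2.1
          rw [show bsCount cs (i + 1) = 0 by rw [bsCount_succ, if_neg hnb]] at this
          exact this
        · rw [if_neg (fun h => hq h.1), if_neg (fun h => hq h.1), if_neg hq]
          by_cases hs : cs.getD i ' ' = '/'
          · rw [if_pos hs]
            by_cases h1 : i + 1 < cs.length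
            · have hdrop1 : cs.drop (i + 1) = cs.getD (i + 1) ' ' :: cs.drop (i + 2) :=
                drop_getD cs (i + 1) h1
              by_cases hq1 : cs.getD (i + 1) ' ' = '/'
              · rw [if_pos ⟨rfl, hs, h1, hq1⟩,
                  skipLine_step cs i ⟨hin, by rw [hs]; decide⟩,
                  skipLine_step cs (i + 1) ⟨h1, by rw [hq1]; decide⟩,
                  hdrop1, goB_slash, if_pos hq1]
                exact (ih (i + 2) (by omega) f (by omega) acc).2.2.1
              · by_cases hb1 : cs.getD (i + 1) ' ' = '*'
                · rw [if_neg (fun h => hq1 h.2.2.2), if_pos ⟨rfl, hs, h1, hb1⟩,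
                    hdrop1, goB_slash, if_neg hq1, if_pos hb1]
                  exact (ih (i + 2) (by omega) f (by omega) acc).2.2.2.1
                · rw [if_neg (fun h => hq1 h.2.2.2), if_neg (fun h => hb1 h.2.2.2),
                    hdrop1, goB_slash, if_neg hq1, if_neg hb1]
                  obtain ⟨f, rfl⟩ : ∃ f', f = f' + 1 := ⟨f - 1, by omega⟩
                  rw [goA_succ, if_pos h1]
                  have happ : acc ++ ['/', cs.getD (i + 1) ' '] =
                      acc ++ [cs.getD i ' '] ++ [cs.getD (i + 1) ' '] := by
                    rw [hs, List.append_assoc]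
                    rfl
                  by_cases hqq : cs.getD (i + 1) ' ' = '"'
                  · rw [if_pos ⟨hqq, rfl⟩, if_pos hqq, happ]
                    have hnb1 : ¬ cs.getD (i + 1) ' ' = '\\' := by rw [hqq]; decide
                    have := (ih (i + 2) (by omega) f (by omega)
                      (acc ++ [cs.getD i ' '] ++ [cs.getD (i + 1) ' '])).2.1
                    rw [show bsCount cs (i + 2) = 0 by
                      rw [bsCount_succ, if_neg hnb1]] at this
                    exact this
                  · rw [if_neg (fun h => hqq h.1), if_neg (fun h => hqq h.1),
                      if_neg (fun h => hq1 h.2.1), if_neg (fun h => hq1 h.2.1),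
                      if_neg hqq, happ]
                    exact (ih (i + 2) (by omega) f (by omega)
                      (acc ++ [cs.getD i ' '] ++ [cs.getD (i + 1) ' '])).1
            · rw [if_neg (fun h => h1 h.2.2.1), if_neg (fun h => h1 h.2.2.1),
                List.drop_eq_nil_of_le (show cs.length ≤ i + 1 by omega),
                goB_nil, if_pos rfl]
              obtain ⟨f, rfl⟩ : ∃ f', f = f' + 1 := ⟨f - 1, by omega⟩
              rw [goA_succ, if_neg h1, hs]
          · rw [if_neg (fun h => hs h.2.1), if_neg (fun h => hs h.2.1), if_neg hs]
            exact (ih (i + 1) (by omega) f (by omega) (acc ++ [cs.getD i ' '])).1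
      exact ⟨haN, hbS, hcL, hdB, he⟩
    · exact key_base cs i (by omega) f (by omega) acc

theorem strip_jsonc_comments_spec : Claim_equal_strip_jsonc_comments := by
  intro text _
  unfold Spec_strip_jsonc_comments strip_jsonc_comments strip_jsonc_comments_alt
  have h := (key text.toList text.toList.length 0 (by omega) (text.toList.length + 1) (by omega) []).1
  simp only [List.drop_zero] at h
  rw [h]
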